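-- pv_equiv track=rewrite | github.com/Adarsh2151/Data-Structure-and-Algorithms | Array and Strings/2D_Array/Print Like A Wave.py | wavePrint
-- ===== SOURCE A (Python) =====
-- def wavePrint(arr, nRows, mCols):
--
--     # Write your code here.
--     # Return a list of integers denoting the sine wave of the matrix
--     ans  = []
--     row = 0
--     col = 0
--     i = 0
--     increase = 1
--     while i < nRows*mCols:
--         if row >= nRows:
--             row -= 1
--             col += 1
--             increase = -1
--         if row < 0:
--             row += 1
--             col += 1
--             increase = 1
--         ans.append(arr[row][col])
--         i += 1
--         row += increase
--     return ans
-- ===== SOURCE B (Python) =====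
-- def wavePrint(arr, nRows, mCols):
--     if nRows <= 0:
--         return []
--     ans = []
--     for col in range(mCols):
--         if col % 2 == 0:
--             for row in range(nRows):
--                 ans.append(arr[row][col])
--         else:
--             for row in range(nRows - 1, -1, -1):
--                 ans.append(arr[row][col])
--     return ans
-- ===== Notes on version B (the rewrite author's own statement) =====
-- stated objective: idiomatic
-- what changed: Replaced A's single pointer-walking while-loop with mutable row/col/increase state and in-loop boundary corrections by a structured double for-loop over columns that picks the scan direction (top-down / bottom-up) from the column's parity, with no direction state.
-- outside the precondition, e.g. on wavePrint([[5, 6, 7]], -1, -1): A returns [7], B returns []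
import Mathlib
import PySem

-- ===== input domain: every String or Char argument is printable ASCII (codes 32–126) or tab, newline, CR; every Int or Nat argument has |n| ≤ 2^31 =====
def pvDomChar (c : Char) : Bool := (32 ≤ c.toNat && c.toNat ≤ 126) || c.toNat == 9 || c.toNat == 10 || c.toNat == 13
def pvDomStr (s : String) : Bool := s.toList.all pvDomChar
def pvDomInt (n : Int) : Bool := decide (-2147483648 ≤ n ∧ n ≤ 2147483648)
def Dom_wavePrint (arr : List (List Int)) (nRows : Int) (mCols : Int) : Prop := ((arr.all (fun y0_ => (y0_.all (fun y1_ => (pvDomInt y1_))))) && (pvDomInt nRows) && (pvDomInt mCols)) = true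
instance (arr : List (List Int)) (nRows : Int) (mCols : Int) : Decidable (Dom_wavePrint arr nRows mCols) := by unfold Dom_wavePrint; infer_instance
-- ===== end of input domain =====

-- B replaces A's pointer-walking while-loop (row/col/increase state with boundary corrections)
-- by a double for-loop over columns choosing scan direction by column parity (idiomatic; same cost).


-- ===== PORT A =====
-- arr[row][col] (both accesses in range on every admitted input; getD 0 is never reached inside Pre_)
def pyAt (arr : List (List Int)) (r c : Int) : Int :=
  (PySem.List.pyGet? ((PySem.List.pyGet? arr r).getD []) c).getD 0

-- literal port of A's while-loop; state (ans, row, col, i, increase)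
def wavePrintLoop (arr : List (List Int)) (nRows mCols : Int)
    (ans : List Int) (row col i increase : Int) : List Int :=
  if h : i < nRows * mCols then
    -- if row >= nRows: row -= 1; col += 1; increase = -1
    let p := if row ≥ nRows then (row - 1, col + 1, (-1 : Int)) else (row, col, increase)
    -- if row < 0: row += 1; col += 1; increase = 1
    let q := if p.1 < 0 then (p.1 + 1, p.2.1 + 1, (1 : Int)) else p
    -- ans.append(arr[row][col]); i += 1; row += increase
    wavePrintLoop arr nRows mCols (ans ++ [pyAt arr q.1 q.2.1]) (q.1 + q.2.2) q.2.1 (i + 1) q.2.2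
  else ans
termination_by (nRows * mCols - i).toNat
decreasing_by omega

def wavePrint (arr : List (List Int)) (nRows : Int) (mCols : Int) : List Int :=
  wavePrintLoop arr nRows mCols [] 0 0 0 1

-- ===== PORT B =====
def wavePrint_alt (arr : List (List Int)) (nRows : Int) (mCols : Int) : List Int :=
  if nRows ≤ 0 then [] else
  (PySem.List.pyRange 0 mCols 1).foldl (fun ans col =>
    if PySem.Int.mod col 2 == 0 then
      (PySem.List.pyRange 0 nRows 1).foldl (fun a row => a ++ [pyAt arr row col]) ans
    else
      (PySem.List.pyRange (nRows - 1) (-1) (-1)).foldl (fun a row => a ++ [pyAt arr row col]) ans) []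

-- ===== PRECONDITION & SPEC =====
-- Pre_ excludes only the inputs with BOTH nRows < 0 and mCols < 0 (there A's walk reads via
-- negative-index wraparound and returns garbage, or raises IndexError) and, when both dims are
-- positive, the inputs whose matrix is smaller than the claimed nRows × mCols (there A raises IndexError).
def Pre_wavePrint (arr : List (List Int)) (nRows : Int) (mCols : Int) : Prop :=
  (0 ≤ nRows ∨ 0 ≤ mCols) ∧
  (0 < nRows → 0 < mCols →
    nRows ≤ arr.length ∧ ∀ r ∈ arr.take nRows.toNat, mCols ≤ (r.length : Int))
instance (arr : List (List Int)) (nRows : Int) (mCols : Int) : Decidable (Pre_wavePrint arr nRows mCols) := by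
  unfold Pre_wavePrint; infer_instance

def pvWitness_wavePrint : List (List Int) × Int × Int := ([[1, 2], [3, 4], [5, 6]], 3, 2)

def Spec_wavePrint (arr : List (List Int)) (nRows : Int) (mCols : Int) (out : List Int) : Prop := out = wavePrint_alt arr nRows mCols
instance (arr : List (List Int)) (nRows : Int) (mCols : Int) (out : List Int) : Decidable (Spec_wavePrint arr nRows mCols out) := by unfold Spec_wavePrint; infer_instance

-- ===== CLAIM (what is proved, stated in full; the proofs are below) =====
def Claim_equal_wavePrint : Prop := ∀ (arr : List (List Int)) (nRows : Int) (mCols : Int), Dom_wavePrint arr nRows mCols → Pre_wavePrint arr nRows mCols → Spec_wavePrint arr nRows mCols (wavePrint arr nRows mCols)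

-- ===== LEMMAS AND PROOFS =====

-- the wave, column by column from column c, fuel n columns, direction d (true = top-down)
def waveAux (arr : List (List Int)) (R : Nat) : Nat → Nat → Bool → List Int
  | 0, _, _ => []
  | n + 1, c, d =>
      (if d then (List.range' 0 R).map (fun r => pyAt arr (r : Int) (c : Int))
       else (List.range' 0 R).map (fun t => pyAt arr ((R : Int) - 1 - (t : Int)) (c : Int)))
        ++ waveAux arr R n (c + 1) (!d)

lemma foldl_app_map {α : Type} (g : α → Int) (ans : List Int) (l : List α) :
    l.foldl (fun a row => a ++ [g row]) ans = ans ++ l.map g := by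
  induction l generalizing ans with
  | nil => simp
  | cons x xs ih => simp [List.foldl_cons, ih, List.append_assoc]

lemma iLt {R C c k : Nat} (hk : k < R) (hc : c < C) : c * R + k < R * C := by
  have h1 : (c + 1) * R ≤ C * R := Nat.mul_le_mul_right R hc
  rw [Nat.succ_mul] at h1
  have h2 : R * C = C * R := Nat.mul_comm R C
  omega

lemma down_pass (arr : List (List Int)) (R C : Nat) :
    ∀ (m k : Nat) (ans : List Int) (c : Nat), R - k = m → k ≤ R → c < C →
      wavePrintLoop arr (R : Int) (C : Int) ans (k : Int) (c : Int) ((c * R + k : Nat) : Int) 1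
        = wavePrintLoop arr (R : Int) (C : Int)
            (ans ++ (List.range' k (R - k)).map (fun r => pyAt arr (r : Int) (c : Int)))
            (R : Int) (c : Int) ((c * R + R : Nat) : Int) 1 := by
  intro m
  induction m with
  | zero =>
      intro k ans c hm hk hc
      have hkR : k = R := by omega
      subst hkR; simp
  | succ m ih =>
      intro k ans c hm hk hc
      have hkR : k < R := by omega
      rw [wavePrintLoop]
      have hlt : ((c * R + k : Nat) : Int) < (R : Int) * (C : Int) := by
        have := iLt hkR hc; push_cast; exact_mod_cast this
      rw [dif_pos hlt]
      have h1 : ¬ ((k : Int) ≥ (R : Int)) := by exact_mod_cast not_le.mpr (by exact_mod_cast hkR)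
      have h2 : ¬ ((k : Int) < 0) := by omega
      simp only [h1, if_false, h2]
      have e1 : (↑k + 1 : Int) = ((k + 1 : Nat) : Int) := by push_cast; ring
      have e2 : ((c * R + k : Nat) : Int) + 1 = ((c * R + (k + 1) : Nat) : Int) := by push_cast; ring
      rw [e1, e2, ih (k + 1) _ c (by omega) (by omega) hc]
      congr 1
      have e3 : R - k = (R - (k + 1)) + 1 := by omega
      rw [e3, List.range'_succ]
      simp [List.append_assoc]

lemma up_pass (arr : List (List Int)) (R C : Nat) :
    ∀ (m k : Nat) (ans : List Int) (c : Nat), R - k = m → k ≤ R → c < C →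
      wavePrintLoop arr (R : Int) (C : Int) ans ((R : Int) - 1 - (k : Int)) (c : Int) ((c * R + k : Nat) : Int) (-1)
        = wavePrintLoop arr (R : Int) (C : Int)
            (ans ++ (List.range' k (R - k)).map (fun t => pyAt arr ((R : Int) - 1 - (t : Int)) (c : Int)))
            (-1) (c : Int) ((c * R + R : Nat) : Int) (-1) := by
  intro m
  induction m with
  | zero =>
      intro k ans c hm hk hc
      have hkR : k = R := by omega
      have e0 : ((R : Int) - 1 - (k : Int)) = -1 := by omega
      rw [e0, hkR]; simp
  | succ m ih =>
      intro k ans c hm hk hc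
      have hkR : k < R := by omega
      rw [wavePrintLoop]
      have hlt : ((c * R + k : Nat) : Int) < (R : Int) * (C : Int) := by
        have := iLt hkR hc; push_cast; exact_mod_cast this
      rw [dif_pos hlt]
      have h1 : ¬ ((R : Int) - 1 - (k : Int) ≥ (R : Int)) := by omega
      have h2 : ¬ ((R : Int) - 1 - (k : Int) < 0) := by omega
      simp only [h1, if_false, h2]
      have e1 : ((R : Int) - 1 - (k : Int)) + (-1) = (R : Int) - 1 - ((k + 1 : Nat) : Int) := by
        push_cast; ring
      have e2 : ((c * R + k : Nat) : Int) + 1 = ((c * R + (k + 1) : Nat) : Int) := by push_cast; ring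
      rw [e1, e2, ih (k + 1) _ c (by omega) (by omega) hc]
      congr 1
      have e3 : R - k = (R - (k + 1)) + 1 := by omega
      rw [e3, List.range'_succ]
      simp [List.append_assoc]

-- chained passes from the boundary states
lemma chain (arr : List (List Int)) (R C : Nat) (hR : 0 < R) :
    ∀ (n : Nat) (c : Nat) (ans : List Int), c + 1 + n = C →
      (wavePrintLoop arr (R : Int) (C : Int) ans (R : Int) (c : Int) (((c + 1) * R : Nat) : Int) 1
        = ans ++ waveAux arr R n (c + 1) false)
      ∧ (wavePrintLoop arr (R : Int) (C : Int) ans (-1) (c : Int) (((c + 1) * R : Nat) : Int) (-1)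
        = ans ++ waveAux arr R n (c + 1) true) := by
  intro n
  induction n with
  | zero =>
      intro c ans hcC
      have hcc : (c + 1) * R = R * C := by rw [← hcC]; ring
      constructor <;>
        (rw [wavePrintLoop, dif_neg (by rw [hcc]; push_cast; omega)]; simp [waveAux])
  | succ n ih =>
      intro c ans hcC
      have hc1 : c + 1 < C := by omega
      have hlt : (((c + 1) * R : Nat) : Int) < (R : Int) * (C : Int) := by
        have h1 : (c + 1 + 1) * R ≤ C * R := Nat.mul_le_mul_right R (by omega)
        rw [Nat.succ_mul] at h1
        have h2 : R * C = C * R := Nat.mul_comm R C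
        push_cast
        have : (c + 1) * R < R * C := by omega
        exact_mod_cast this
      constructor
      · rw [wavePrintLoop, dif_pos hlt]
        have h1 : ((R : Int) ≥ (R : Int)) := le_refl _
        have h2 : ¬ ((R : Int) - 1 < 0) := by omega
        simp only [ge_iff_le, le_refl, if_true, h2, if_false]
        have e1 : ((R : Int) - 1) + (-1) = (R : Int) - 1 - ((1 : Nat) : Int) := by push_cast; ring
        have e2 : (((c + 1) * R : Nat) : Int) + 1 = (((c + 1) * R + 1 : Nat) : Int) := by push_cast; ring
        have e3 : ((c : Int) + 1) = ((c + 1 : Nat) : Int) := by push_cast; ring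
        rw [e1, e2, e3, up_pass arr R C (R - 1) 1 _ (c + 1) (by omega) (by omega) hc1]
        have e5 : ((c + 1) * R + R : Nat) = ((c + 1 + 1) * R : Nat) := by ring
        rw [e5, ((ih (c + 1) _) (by omega)).2]
        have e6 : R = (R - 1) + 1 := by omega
        rw [show waveAux arr R (n + 1) (c + 1) false
              = (List.range' 0 R).map (fun t => pyAt arr ((R : Int) - 1 - (t : Int)) ((c + 1 : Nat) : Int))
                ++ waveAux arr R n (c + 1 + 1) true from rfl]
        rw [e6, List.range'_succ]
        simp [List.append_assoc]
      · rw [wavePrintLoop, dif_pos hlt]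
        have h1 : ¬ ((-1 : Int) ≥ (R : Int)) := by omega
        have h2 : ((-1 : Int) < 0) := by omega
        simp only [h1, if_false, h2, if_true]
        have e1 : (-1 + 1 + 1 : Int) = ((1 : Nat) : Int) := by norm_num
        have e2 : (((c + 1) * R : Nat) : Int) + 1 = (((c + 1) * R + 1 : Nat) : Int) := by push_cast; ring
        have e3 : ((c : Int) + 1) = ((c + 1 : Nat) : Int) := by push_cast; ring
        have e4 : (-1 + 1 : Int) = ((0 : Nat) : Int) := by norm_num
        rw [e1, e2, e3, e4, down_pass arr R C (R - 1) 1 _ (c + 1) (by omega) (by omega) hc1]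
        have e5 : ((c + 1) * R + R : Nat) = ((c + 1 + 1) * R : Nat) := by ring
        rw [e5, ((ih (c + 1) _) (by omega)).1]
        have e6 : R = (R - 1) + 1 := by omega
        rw [show waveAux arr R (n + 1) (c + 1) true
              = (List.range' 0 R).map (fun r => pyAt arr (r : Int) ((c + 1 : Nat) : Int))
                ++ waveAux arr R n (c + 1 + 1) false from rfl]
        rw [e6, List.range'_succ]
        simp [List.append_assoc]

lemma a_eq_wave (arr : List (List Int)) (R C : Nat) (hR : 0 < R) (hC : 0 < C) :
    wavePrint arr (R : Int) (C : Int) = waveAux arr R C 0 true := by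
  obtain ⟨C', rfl⟩ : ∃ C', C = C' + 1 := ⟨C - 1, by omega⟩
  unfold wavePrint
  rw [show wavePrintLoop arr (R : Int) ((C' + 1 : Nat) : Int) [] 0 0 0 1
        = wavePrintLoop arr (R : Int) ((C' + 1 : Nat) : Int) [] ((0 : Nat) : Int) ((0 : Nat) : Int)
            ((0 * R + 0 : Nat) : Int) 1 from by norm_num]
  rw [down_pass arr R (C' + 1) R 0 [] 0 (by omega) (by omega) (by omega)]
  rw [show (0 * R + R : Nat) = ((0 + 1) * R : Nat) from by ring]
  rw [(chain arr R (C' + 1) hR C' 0 _ (by omega)).1]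
  rfl

lemma flatMap_cast : ∀ l : List Nat,
    List.flatMap (fun a : Nat => [(a : Int)]) l = l.map (fun a : Nat => (a : Int))
  | [] => rfl
  | x :: xs => by rw [List.flatMap_cons, List.map_cons, flatMap_cast xs]; rfl

lemma parity_flip (c : Nat) : decide ((c + 1) % 2 = 0) = !decide (c % 2 = 0) := by
  rcases Nat.mod_two_eq_zero_or_one c with h | h <;> simp [Nat.add_mod, h]

lemma mod_two_cast (c : Nat) : PySem.Int.mod (c : Int) 2 = ((c % 2 : Nat) : Int) := by
  rw [PySem.Int.mod_eq_emod_of_pos (by norm_num)]; omega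

lemma inner_down (arr : List (List Int)) (R : Nat) (col : Int) (ans : List Int) :
    (PySem.List.pyRange 0 (R : Int) 1).foldl (fun a row => a ++ [pyAt arr row col]) ans
      = ans ++ (List.range' 0 R).map (fun r => pyAt arr (r : Int) col) := by
  rw [PySem.List.pyRange_one, List.foldl_map, foldl_app_map (fun k : Nat => pyAt arr (0 + (k : Int)) col)]
  simp [List.range_eq_range', flatMap_cast, List.map_map, Function.comp]

lemma inner_up (arr : List (List Int)) (R : Nat) (col : Int) (ans : List Int) :
    (PySem.List.pyRange ((R : Int) - 1) (-1) (-1)).foldl (fun a row => a ++ [pyAt arr row col]) ans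
      = ans ++ (List.range' 0 R).map (fun t => pyAt arr ((R : Int) - 1 - (t : Int)) col) := by
  rw [PySem.List.pyRange_neg_one, List.foldl_map,
    foldl_app_map (fun k : Nat => pyAt arr ((R : Int) - 1 - (k : Int)) col)]
  have : ((R : Int) - 1 - (-1)).toNat = R := by omega
  simp [List.range_eq_range', flatMap_cast, List.map_map, Function.comp]

lemma b_fold (arr : List (List Int)) (R : Nat) :
    ∀ (n c : Nat) (ans : List Int) (d : Bool), d = decide (c % 2 = 0) →
      ((List.range' c n).map (fun k : Nat => (k : Int))).foldl (fun ans col =>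
          if PySem.Int.mod col 2 == 0 then
            (PySem.List.pyRange 0 (R : Int) 1).foldl (fun a row => a ++ [pyAt arr row col]) ans
          else
            (PySem.List.pyRange ((R : Int) - 1) (-1) (-1)).foldl (fun a row => a ++ [pyAt arr row col]) ans)
        ans
      = ans ++ waveAux arr R n c d
  | 0, c, ans, d, hd => by simp [waveAux]
  | n + 1, c, ans, d, hd => by
      rw [List.range'_succ, List.map_cons, List.foldl_cons]
      by_cases hpar : c % 2 = 0
      · have hd' : d = true := by rw [hd]; simp [hpar]
        subst hd'
        rw [if_pos (by rw [mod_two_cast, hpar]; rfl)]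
        rw [inner_down arr R ((c : Nat) : Int) ans]
        rw [b_fold arr R n (c + 1) _ false (by rw [parity_flip, ← hd]; rfl)]
        simp [waveAux, List.append_assoc]
      · have hd' : d = false := by rw [hd]; simp [hpar]
        subst hd'
        rw [if_neg (by
          rw [mod_two_cast]
          have h1 : c % 2 = 1 := by omega
          rw [h1]; simp)]
        rw [inner_up arr R ((c : Nat) : Int) ans]
        rw [b_fold arr R n (c + 1) _ true (by rw [parity_flip, ← hd]; rfl)]
        simp [waveAux, List.append_assoc]

lemma b_eq_wave (arr : List (List Int)) (R C : Nat) (hR : 0 < R) :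
    wavePrint_alt arr (R : Int) (C : Int) = waveAux arr R C 0 true := by
  unfold wavePrint_alt
  rw [if_neg (by exact_mod_cast not_le.mpr (by exact_mod_cast hR : (0 : Int) < (R : Int)))]
  have hl : PySem.List.pyRange 0 (C : Int) 1 = (List.range' 0 C).map (fun k : Nat => (k : Int)) := by
    rw [PySem.List.pyRange_one]
    norm_num [List.range_eq_range']
  rw [hl, b_fold arr R C 0 [] true (by rfl)]
  rfl

-- ===== VERDICT (by name: the statement is the Claim_ definition above) =====
theorem wavePrint_spec : Claim_equal_wavePrint := by
  intro arr nR mC hdom hpre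
  unfold Pre_wavePrint at hpre
  obtain ⟨hsign, -⟩ := hpre
  unfold Spec_wavePrint
  by_cases hC : 0 < mC
  · by_cases hR : 0 < nR
    · obtain ⟨R, rfl⟩ : ∃ R : Nat, nR = (R : Int) := ⟨nR.toNat, by omega⟩
      obtain ⟨C, rfl⟩ : ∃ C : Nat, mC = (C : Int) := ⟨mC.toNat, by omega⟩
      rw [a_eq_wave arr R C (by exact_mod_cast hR) (by exact_mod_cast hC),
        b_eq_wave arr R C (by exact_mod_cast hR)]
    · have hA : wavePrint arr nR mC = [] := by
        unfold wavePrint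
        rw [wavePrintLoop, dif_neg]
        have : nR * mC ≤ 0 := mul_nonpos_of_nonpos_of_nonneg (by omega) (by omega)
        omega
      have hB : wavePrint_alt arr nR mC = [] := by
        unfold wavePrint_alt
        rw [if_pos (by omega)]
      rw [hA, hB]
  · have hA : wavePrint arr nR mC = [] := by
      unfold wavePrint
      rw [wavePrintLoop, dif_neg]
      rcases hsign with hn | hm
      · have : nR * mC ≤ 0 := mul_nonpos_of_nonneg_of_nonpos hn (by omega)
        omega
      · have hz : mC = 0 := by omega
        simp [hz]
    have hB : wavePrint_alt arr nR mC = [] := by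
      unfold wavePrint_alt
      by_cases hn : nR ≤ 0
      · rw [if_pos hn]
      · rw [if_neg hn]
        have hl : PySem.List.pyRange 0 mC 1 = [] := PySem.List.pyRange_one_eq_nil (by omega)
        rw [hl]
        rfl
    rw [hA, hB]
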